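-- pv_equiv track=rewrite | github.com/dsardelic/Tagger | pathtagger/db_operations.py | _classify_doc_ids
-- ===== SOURCE A (Python) =====
-- from collections import namedtuple
-- from typing import List, NamedTuple, Optional, Set, Union
--
-- def _classify_doc_ids(doc_ids: List[int], reference_doc_ids: Set[int]) -> NamedTuple:
--     DocIdClassification = namedtuple(
--         "DocIdClassification", "invalid_doc_ids nonexistent_doc_ids existing_doc_ids"
--     )
--     if not (doc_ids and reference_doc_ids):
--         return DocIdClassification(set(), set(), set())
--     invalid_doc_ids = {doc_id for doc_id in doc_ids if not doc_id}
--     valid_doc_ids = set(doc_ids) - invalid_doc_ids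
--     return DocIdClassification(
--         invalid_doc_ids,
--         valid_doc_ids - reference_doc_ids,
--         valid_doc_ids.intersection(reference_doc_ids),
--     )
-- ===== SOURCE B (Python) =====
-- from collections import namedtuple
-- from typing import List, NamedTuple, Set
--
--
-- def _classify_doc_ids(doc_ids: List[int], reference_doc_ids: Set[int]) -> NamedTuple:
--     DocIdClassification = namedtuple(
--         "DocIdClassification", "invalid_doc_ids nonexistent_doc_ids existing_doc_ids"
--     )
--     if not (doc_ids and reference_doc_ids):
--         return DocIdClassification(set(), set(), set())
--     invalid_doc_ids, nonexistent_doc_ids, existing_doc_ids = set(), set(), set()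
--     for doc_id in doc_ids:
--         if not doc_id:
--             invalid_doc_ids.add(doc_id)
--         elif doc_id in reference_doc_ids:
--             existing_doc_ids.add(doc_id)
--         else:
--             nonexistent_doc_ids.add(doc_id)
--     return DocIdClassification(invalid_doc_ids, nonexistent_doc_ids, existing_doc_ids)
-- ===== Notes on version B (the rewrite author's own statement) =====
-- stated objective: alternative
-- what changed: Replaces the set-algebra pipeline (comprehension, set(), two differences, one intersection) with a single pass over doc_ids that branches each id into one of three accumulated sets.
import Mathlib
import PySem

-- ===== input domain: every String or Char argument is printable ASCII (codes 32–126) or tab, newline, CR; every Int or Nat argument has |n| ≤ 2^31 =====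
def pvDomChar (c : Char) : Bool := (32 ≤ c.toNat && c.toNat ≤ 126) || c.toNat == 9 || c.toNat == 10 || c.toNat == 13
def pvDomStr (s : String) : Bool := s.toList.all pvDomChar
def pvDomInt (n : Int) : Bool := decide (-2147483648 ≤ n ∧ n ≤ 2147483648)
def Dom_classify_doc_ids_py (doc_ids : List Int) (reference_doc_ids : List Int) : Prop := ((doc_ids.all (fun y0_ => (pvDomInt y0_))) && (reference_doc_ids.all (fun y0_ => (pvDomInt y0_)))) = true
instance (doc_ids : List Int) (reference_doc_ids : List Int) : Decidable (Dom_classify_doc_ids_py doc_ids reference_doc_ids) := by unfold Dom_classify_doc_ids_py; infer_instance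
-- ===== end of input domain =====

-- B replaces A's set-algebra pipeline (comprehension + set difference/intersection) with one
-- branching pass over doc_ids accumulating the three sets; an alternative decomposition, not faster.

-- ===== PORT A =====
def classify_doc_ids_py (doc_ids : List Int) (reference_doc_ids : List Int) : List Int × List Int × List Int :=
  if doc_ids = [] ∨ reference_doc_ids = [] then ([], [], [])
  else
    let invalid_doc_ids : PySem.Set Int := PySem.Set.ofList (doc_ids.filter (fun doc_id => doc_id == 0))
    let valid_doc_ids : PySem.Set Int := PySem.Set.diff (PySem.Set.ofList doc_ids) invalid_doc_ids
    (invalid_doc_ids,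
     PySem.Set.diff valid_doc_ids reference_doc_ids,
     PySem.Set.inter valid_doc_ids reference_doc_ids)

-- ===== PORT B =====
-- loop body of B's single pass: route one doc_id into (invalid, nonexistent, existing)
def classifyStep (reference_doc_ids : List Int)
    (acc : PySem.Set Int × PySem.Set Int × PySem.Set Int) (doc_id : Int) :
    PySem.Set Int × PySem.Set Int × PySem.Set Int :=
  if doc_id == 0 then (PySem.Set.add acc.1 doc_id, acc.2.1, acc.2.2)
  else if reference_doc_ids.contains doc_id then (acc.1, acc.2.1, PySem.Set.add acc.2.2 doc_id)
  else (acc.1, PySem.Set.add acc.2.1 doc_id, acc.2.2)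

def classify_doc_ids_py_alt (doc_ids : List Int) (reference_doc_ids : List Int) : List Int × List Int × List Int :=
  if doc_ids = [] ∨ reference_doc_ids = [] then ([], [], [])
  else
    let r := doc_ids.foldl (classifyStep reference_doc_ids)
      (PySem.Set.empty, PySem.Set.empty, PySem.Set.empty)
    (r.1, r.2.1, r.2.2)

-- ===== PRECONDITION & SPEC =====
def Spec_classify_doc_ids_py (doc_ids : List Int) (reference_doc_ids : List Int) (out : List Int × List Int × List Int) : Prop := out = classify_doc_ids_py_alt doc_ids reference_doc_ids
instance (doc_ids : List Int) (reference_doc_ids : List Int) (out : List Int × List Int × List Int) : Decidable (Spec_classify_doc_ids_py doc_ids reference_doc_ids out) := by unfold Spec_classify_doc_ids_py; infer_instance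

-- ===== CLAIM (what is proved, stated in full; the proofs are below) =====
def Claim_equal_classify_doc_ids_py : Prop := ∀ (doc_ids : List Int) (reference_doc_ids : List Int), Dom_classify_doc_ids_py doc_ids reference_doc_ids → Spec_classify_doc_ids_py doc_ids reference_doc_ids (classify_doc_ids_py doc_ids reference_doc_ids)

-- ===== LEMMAS AND PROOFS =====

theorem filter_set_add (s : PySem.Set Int) (x : Int) (p : Int → Bool) :
    (PySem.Set.add s x).filter p = if p x then PySem.Set.add (s.filter p) x else s.filter p := by
  by_cases h : s.contains x
  · have hx : x ∈ s := by simpa using h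
    simp only [PySem.Set.add, h, if_true]
    by_cases hp : p x
    · simp [hp, hx]
    · simp [hp]
  · have hx : x ∉ s := by simpa using h
    simp only [PySem.Set.add, h]
    by_cases hp : p x
    · simp [hp, hx, List.filter_append]
    · simp [hp, List.filter_append]

theorem filter_foldl_add (xs : List Int) (p : Int → Bool) :
    ∀ s : PySem.Set Int, (xs.foldl PySem.Set.add s).filter p
      = (xs.filter p).foldl PySem.Set.add (s.filter p) := by
  induction xs with
  | nil => intro s; rfl
  | cons d xs ih =>
    intro s
    simp only [List.foldl_cons, List.filter_cons]
    rw [ih, filter_set_add]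
    by_cases hp : p d <;> simp [hp]

theorem filter_ofList (xs : List Int) (p : Int → Bool) :
    (PySem.Set.ofList xs).filter p = PySem.Set.ofList (xs.filter p) := by
  simpa [PySem.Set.ofList, PySem.Set.empty] using filter_foldl_add xs p []

-- B's fold, component-wise: each slot is the fold of Set.add over the matching sub-filter
theorem classify_fold (ref : List Int) (xs : List Int) :
    ∀ inv non ex : PySem.Set Int,
    xs.foldl (classifyStep ref) (inv, non, ex)
      = ((xs.filter (fun d => d == 0)).foldl PySem.Set.add inv,
         (xs.filter (fun d => !(d == 0) && !ref.contains d)).foldl PySem.Set.add non,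
         (xs.filter (fun d => !(d == 0) && ref.contains d)).foldl PySem.Set.add ex) := by
  induction xs with
  | nil => intro inv non ex; rfl
  | cons d xs ih =>
    intro inv non ex
    by_cases h0 : d = 0
    · simp [classifyStep, h0, ih]
    · by_cases hr : d ∈ ref
      · simp [classifyStep, h0, hr, ih]
      · simp [classifyStep, h0, hr, ih]

theorem contains_invalid (xs : List Int) (x : Int) (hx : x ∈ xs) :
    (PySem.Set.ofList (xs.filter (fun d => d == 0))).contains x = (x == 0) := by
  by_cases h : x = 0
  · subst h
    have : (0 : Int) ∈ PySem.Set.ofList (xs.filter (fun d => d == 0)) := by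
      rw [PySem.Set.mem_ofList]
      simp [List.mem_filter, hx]
    simp [this]
  · have : x ∉ PySem.Set.ofList (xs.filter (fun d => d == 0)) := by
      rw [PySem.Set.mem_ofList]
      simp [List.mem_filter, h]
    simpa [h] using this

theorem diffpart (xs : List Int) (q : Int → Bool) :
    List.filter q (List.filter (fun x => !(PySem.Set.ofList (xs.filter (fun d => d == 0))).contains x) (PySem.Set.ofList xs))
      = PySem.Set.ofList (xs.filter (fun d => !(d == 0) && q d)) := by
  rw [List.filter_filter]
  rw [List.filter_congr (q := fun x => !(x == 0) && q x)
        (fun x hx => by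
          rw [contains_invalid xs x ((PySem.Set.mem_ofList xs x).mp hx)]
          exact Bool.and_comm _ _)]
  exact filter_ofList xs _

-- ===== VERDICT (by name: the statement is the Claim_ definition above) =====
theorem classify_doc_ids_py_spec : Claim_equal_classify_doc_ids_py := by
  intro doc_ids reference_doc_ids _
  unfold Spec_classify_doc_ids_py
  by_cases hg : doc_ids = [] ∨ reference_doc_ids = []
  · simp [classify_doc_ids_py, classify_doc_ids_py_alt, hg]
  · simp only [classify_doc_ids_py, classify_doc_ids_py_alt, hg, if_false]
    rw [classify_fold]
    refine Prod.ext rfl (Prod.ext ?_ ?_)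
    · exact diffpart doc_ids (fun x => !reference_doc_ids.contains x)
    · exact diffpart doc_ids (fun x => reference_doc_ids.contains x)
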